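-- pv_equiv track=rewrite | github.com/humancipher/Programming_Contest | Programming_Contest/yukicoder/level_2/level2_1-100/no7.py | solve
-- ===== SOURCE A (Python) =====
-- from math import sqrt
--
-- def eratos(n):
--     E = [True for _ in range(n+1)] #E[i]:iが素数かどうか
--     E[0],E[1] = False,False
--     for a in range(2,int(sqrt(n))+1):
--         if E[a]:
--             for i in range(2,n // a + 1):
--                 E[a * i] = False
--     P = set()
--     for a in range(n+1):
--         if E[a]:
--             P.add(a)
--     return P
--
-- def solve(n):
--     dp = [False for _ in range(n+1)] #dp[i]:iで先手番になったら先手が勝利かどうか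
--     dp[0],dp[1] = True,True
--     P = eratos(n)
--     for i in range(n+1):
--         for p in P:
--             if i-p >= 0:
--                 if not dp[i-p]:
--                     dp[i] = True
--     return dp[n]
-- ===== SOURCE B (Python) =====
-- from math import isqrt
--
--
-- def solve(n):
--     # O(1) primality via a sieve marked from a*a, then a game scan that
--     # tests only the (sparse) losing positions seen so far.
--     is_p = [True] * (n + 1)
--     is_p[0] = is_p[1] = False
--     for a in range(2, isqrt(n) + 1):
--         if is_p[a]:
--             for m in range(a * a, n + 1, a):
--                 is_p[m] = False
--     losing = []
--     win = False
--     for i in range(n + 1):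
--         win = i <= 1 or any(is_p[i - j] for j in losing)
--         if not win:
--             losing.append(i)
--     return win
-- ===== Notes on version B (the rewrite author's own statement) =====
-- stated objective: faster
-- what changed: A rebuilds dp[i] by scanning every prime up to n for every position i; B sieves by marking multiples from a*a, keeps only a rolling win flag, and for each i scans just the losing positions found so far, testing i-j for primality with an O(1) sieve lookup.
-- outside the precondition, e.g. on solve(0): A raises IndexError, B raises IndexError
import Mathlib
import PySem

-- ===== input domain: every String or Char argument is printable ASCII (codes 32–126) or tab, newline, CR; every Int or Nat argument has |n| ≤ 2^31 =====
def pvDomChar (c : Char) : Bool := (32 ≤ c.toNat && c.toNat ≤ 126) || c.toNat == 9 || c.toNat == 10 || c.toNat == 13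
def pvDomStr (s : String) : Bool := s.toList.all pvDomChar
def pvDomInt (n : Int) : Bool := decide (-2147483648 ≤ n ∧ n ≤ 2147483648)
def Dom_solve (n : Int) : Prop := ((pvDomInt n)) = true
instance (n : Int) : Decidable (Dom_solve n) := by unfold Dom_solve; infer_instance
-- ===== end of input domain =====

-- B replaces A's per-position scan over the whole prime set by a scan over only the
-- losing positions found so far, with an O(1) sieve lookup for primality (measurably faster).

-- ===== PORT A =====
-- A-side helpers: eratosE is the E-array phase of A's eratos(), with the body of one
-- outer iteration split off as eratosStep; eratos builds the prime set P from it.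
-- int(sqrt(n)) is ported as Nat.sqrt n.toNat: exact for 0 ≤ n ≤ 2^31 (IEEE sqrt is
-- correctly rounded there, so int(math.sqrt(n)) = isqrt(n) on the whole domain).
-- Python-list access on a Lean Array (the efficient faithful carrier for A's E/dp
-- lists): exact for a nonnegative in-range index — the only accesses these ports
-- perform under Pre_ (reads are guarded by 0 ≤ i, writes stay within the list).
def pyArrGet (xs : Array Bool) (i : Int) (d : Bool) : Bool := xs.getD i.toNat d
def pyArrSet (xs : Array Bool) (i : Int) (v : Bool) : Array Bool := xs.setIfInBounds i.toNat v

def eratosStep (n : Int) (E : Array Bool) (a : Int) : Array Bool :=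
  if pyArrGet E a false then
    (PySem.List.pyRange 2 (PySem.Int.floordiv n a + 1) 1).foldl
      (fun E i => pyArrSet E (a * i) false) E
  else E

def eratosE (n : Int) : Array Bool :=
  let E0 := ((PySem.List.pyRange 0 (n + 1) 1).map (fun _ => true)).toArray
  let E1 := pyArrSet E0 0 false
  let E2 := pyArrSet E1 1 false
  (PySem.List.pyRange 2 ((Nat.sqrt n.toNat : Int) + 1) 1).foldl (eratosStep n) E2

-- P = {a ≤ n : E[a]}; a Python set of ints. It is consumed below only by an
-- order-independent any-style pass (writes only index i, reads only indices < i),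
-- so the Set's insertion order stands in for Python's hash order harmlessly.
def eratos (n : Int) : PySem.Set Int :=
  let E := eratosE n
  (PySem.List.pyRange 0 (n + 1) 1).foldl
    (fun P a => if pyArrGet E a false then PySem.Set.add P a else P)
    PySem.Set.empty

def solve (n : Int) : Bool :=
  let dp0 := ((PySem.List.pyRange 0 (n + 1) 1).map (fun _ => false)).toArray
  let dp1 := pyArrSet dp0 0 true
  let dp2 := pyArrSet dp1 1 true
  let P := eratos n
  let dp := (PySem.List.pyRange 0 (n + 1) 1).foldl
    (fun dp i =>
      P.foldl (fun dp p =>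
        if 0 ≤ i - p then
          if !(pyArrGet dp (i - p) false) then pyArrSet dp i true else dp
        else dp) dp)
    dp2
  pyArrGet dp n false

-- ===== PORT B =====
-- B-side helper: Source B's sieve (marks multiples from a*a upward, step a).
def sieveB (n : Int) : Array Bool :=
  let s0 := (PySem.List.pyRepeat [true] (n + 1)).toArray
  let s1 := pyArrSet s0 0 false
  let s2 := pyArrSet s1 1 false
  (PySem.List.pyRange 2 ((Nat.sqrt n.toNat : Int) + 1) 1).foldl
    (fun E a =>
      if pyArrGet E a false then
        (PySem.List.pyRange (a * a) (n + 1) a).foldl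
          (fun E m => pyArrSet E m false) E
      else E) s2

def solve_alt (n : Int) : Bool :=
  let isp := sieveB n
  let r := (PySem.List.pyRange 0 (n + 1) 1).foldl
    (fun st i =>
      let win := decide (i ≤ 1) || st.1.any (fun j => pyArrGet isp (i - j) false)
      (if win then st.1 else st.1 ++ [i], win))
    (([] : List Int), false)
  r.2

-- ===== PRECONDITION & SPEC =====
-- A raises IndexError for every n ≤ 0: the two sentinel assignments index past the end of the freshly built list.
def Pre_solve (n : Int) : Prop := 1 ≤ n
instance (n : Int) : Decidable (Pre_solve n) := by unfold Pre_solve; infer_instance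
def pvWitness_solve : Int := 7

def Spec_solve (n : Int) (out : Bool) : Prop := out = solve_alt n
instance (n : Int) (out : Bool) : Decidable (Spec_solve n out) := by unfold Spec_solve; infer_instance

-- ===== CLAIM (what is proved, stated in full; the proofs are below) =====
def Claim_equal_solve : Prop := ∀ (n : Int), Dom_solve n → Pre_solve n → Spec_solve n (solve n)

-- ===== LEMMAS AND PROOFS =====
-- Proof plan: both ports' sieve arrays are proved (via list images of the Array
-- folds) to hold exactly primality on [0, n]; A's dp loop and B's losing-list loop
-- are then both shown to compute the game value Wgame.

-- list images of the two ports' sieves, for the loop-invariant proofs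
def eratosStepL (n : Int) (E : List Bool) (a : Int) : List Bool :=
  if PySem.List.pyGetD E a false then
    (PySem.List.pyRange 2 (PySem.Int.floordiv n a + 1) 1).foldl
      (fun E i => PySem.List.pySetD E (a * i) false) E
  else E

def eratosEL (n : Int) : List Bool :=
  let E0 : List Bool := (PySem.List.pyRange 0 (n + 1) 1).map (fun _ => true)
  let E1 := PySem.List.pySetD E0 0 false
  let E2 := PySem.List.pySetD E1 1 false
  (PySem.List.pyRange 2 ((Nat.sqrt n.toNat : Int) + 1) 1).foldl (eratosStepL n) E2

def sieveBL (n : Int) : List Bool :=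
  let s0 := PySem.List.pyRepeat [true] (n + 1)
  let s1 := PySem.List.pySetD s0 0 false
  let s2 := PySem.List.pySetD s1 1 false
  (PySem.List.pyRange 2 ((Nat.sqrt n.toNat : Int) + 1) 1).foldl
    (fun E a =>
      if PySem.List.pyGetD E a false then
        (PySem.List.pyRange (a * a) (n + 1) a).foldl
          (fun E m => PySem.List.pySetD E m false) E
      else E) s2

lemma getD_set_ite (E : List Bool) (j k : Nat) (v d : Bool) :
    (E.set j v).getD k d = if j = k ∧ j < E.length then v else E.getD k d := by
  simp only [List.getD, List.getElem?_set]
  split_ifs with h1 h2 h3 h4 <;> simp_all <;> omega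

-- length of a marking fold

lemma length_foldl_mark (f : Int → Int) (ms : List Int) (E : List Bool) :
    (ms.foldl (fun E m => PySem.List.pySetD E (f m) false) E).length = E.length := by
  induction ms generalizing E with
  | nil => rfl
  | cons m t ih => simp [List.foldl_cons, ih, PySem.List.length_pySetD]

-- value of a marking fold at a valid index (marked indices nonnegative)

lemma getD_foldl_mark (f : Int → Int) (ms : List Int) (E : List Bool) (k : Nat)
    (hk : k < E.length) (hms : ∀ m ∈ ms, 0 ≤ f m) :
    (ms.foldl (fun E m => PySem.List.pySetD E (f m) false) E).getD k false
      = if ∃ m ∈ ms, f m = (k : Int) then false else E.getD k false := by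
  induction ms generalizing E with
  | nil => simp
  | cons m t ih =>
    have h0 : 0 ≤ f m := hms m (by simp)
    have hset : PySem.List.pySetD E (f m) false = E.set (f m).toNat false :=
      PySem.List.pySetD_of_nonneg _ _ h0
    rw [List.foldl_cons, hset, ih _ (by simp [hk]) (fun x hx => hms x (by simp [hx]))]
    rw [getD_set_ite]
    by_cases hmk : f m = (k : Int)
    · have : (f m).toNat = k := by omega
      simp [hk, hmk, this]
    · have : (f m).toNat ≠ k := by omega
      by_cases ht : ∃ x ∈ t, f x = (k : Int) <;> simp [this, hmk, ht]

def primeFreeA (c k : Nat) : Prop := 2 ≤ k ∧ ∀ p, Nat.Prime p → p < c → p ∣ k → p = k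

def primeFreeB (c k : Nat) : Prop := 2 ≤ k ∧ ∀ p, Nat.Prime p → p < c → p ∣ k → k < p * p

lemma minFac_lt_self (c : Nat) (hc : 2 ≤ c) (hnp : ¬ c.Prime) : c.minFac < c :=
  lt_of_le_of_ne (Nat.minFac_le (by omega)) (fun he => hnp (Nat.prime_def_minFac.mpr ⟨hc, he⟩))

lemma primeFreeA_two (k : Nat) : primeFreeA 2 k ↔ 2 ≤ k := by
  unfold primeFreeA
  constructor
  · exact fun h => h.1
  · refine fun h => ⟨h, fun p hp hlt _ => ?_⟩
    exact absurd hlt (by have := hp.two_le; omega)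

lemma primeFreeB_two (k : Nat) : primeFreeB 2 k ↔ 2 ≤ k := by
  unfold primeFreeB
  constructor
  · exact fun h => h.1
  · refine fun h => ⟨h, fun p hp hlt _ => ?_⟩
    exact absurd hlt (by have := hp.two_le; omega)

lemma primeFreeA_self (c : Nat) (hc : 2 ≤ c) : primeFreeA c c ↔ c.Prime := by
  unfold primeFreeA
  constructor
  · rintro ⟨-, h⟩
    by_contra hnp
    have hp := Nat.minFac_prime (by omega : c ≠ 1)
    have hdvd := Nat.minFac_dvd c
    have hlt : c.minFac < c := minFac_lt_self _ (by omega) hnp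
    exact absurd (h _ hp hlt hdvd) (by omega)
  · intro hp
    refine ⟨hc, fun p hpp hlt hdvd => ?_⟩
    rcases (Nat.Prime.eq_one_or_self_of_dvd hp p hdvd) with h | h
    · exact absurd h hpp.ne_one
    · exact h

lemma primeFreeB_self (c : Nat) (hc : 2 ≤ c) : primeFreeB c c ↔ c.Prime := by
  unfold primeFreeB
  constructor
  · rintro ⟨-, h⟩
    by_contra hnp
    have hp := Nat.minFac_prime (by omega : c ≠ 1)
    have hdvd := Nat.minFac_dvd c
    have hlt : c.minFac < c := minFac_lt_self _ (by omega) hnp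
    have hsq : c.minFac ^ 2 ≤ c := Nat.minFac_sq_le_self (by omega) hnp
    have := h _ hp hlt hdvd
    nlinarith [hsq]
  · intro hp
    refine ⟨hc, fun p hpp hlt hdvd => ?_⟩
    rcases (Nat.Prime.eq_one_or_self_of_dvd hp p hdvd) with h | h
    · exact absurd h hpp.ne_one
    · omega

lemma primeFreeA_sqrt (n k : Nat) (hk : k ≤ n) :
    primeFreeA (Nat.sqrt n + 1) k ↔ k.Prime := by
  unfold primeFreeA
  constructor
  · rintro ⟨h2, h⟩
    by_contra hnp
    have hp := Nat.minFac_prime (by omega : k ≠ 1)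
    have hdvd := Nat.minFac_dvd k
    have hlt : k.minFac < k := minFac_lt_self _ (by omega) hnp
    have hsq : k.minFac ^ 2 ≤ k := Nat.minFac_sq_le_self (by omega) hnp
    have hle : k.minFac ≤ Nat.sqrt n := Nat.le_sqrt.mpr (by nlinarith)
    exact absurd (h _ hp (by omega) hdvd) (by omega)
  · intro hp
    refine ⟨hp.two_le, fun p hpp _ hdvd => ?_⟩
    rcases Nat.Prime.eq_one_or_self_of_dvd hp p hdvd with h | h
    · exact absurd h hpp.ne_one
    · exact h

lemma primeFreeB_sqrt (n k : Nat) (hk : k ≤ n) :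
    primeFreeB (Nat.sqrt n + 1) k ↔ k.Prime := by
  unfold primeFreeB
  constructor
  · rintro ⟨h2, h⟩
    by_contra hnp
    have hp := Nat.minFac_prime (by omega : k ≠ 1)
    have hdvd := Nat.minFac_dvd k
    have hsq : k.minFac ^ 2 ≤ k := Nat.minFac_sq_le_self (by omega) hnp
    have hle : k.minFac ≤ Nat.sqrt n := Nat.le_sqrt.mpr (by nlinarith)
    have := h _ hp (by omega) hdvd
    nlinarith
  · intro hp
    refine ⟨hp.two_le, fun p hpp _ hdvd => ?_⟩
    rcases Nat.Prime.eq_one_or_self_of_dvd hp p hdvd with h | h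
    · exact absurd h hpp.ne_one
    · subst h; nlinarith [hp.two_le]

def sieveInitN (n : Nat) : List Bool := ((List.replicate (n+1) true).set 0 false).set 1 false

lemma sieveInitN_length (n : Nat) : (sieveInitN n).length = n + 1 := by
  simp [sieveInitN]

lemma sieveInitN_getD (n k : Nat) (hn : 1 ≤ n) (hk : k ≤ n) :
    ((sieveInitN n).getD k false = true) ↔ 2 ≤ k := by
  unfold sieveInitN
  rw [getD_set_ite, getD_set_ite]
  simp only [List.length_set, List.length_replicate]
  rcases Nat.lt_or_ge k 2 with h | h
  · interval_cases k
    · rw [if_neg (by omega), if_pos ⟨rfl, by omega⟩]; simp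
    · rw [if_pos ⟨rfl, by omega⟩]; simp
  · rw [if_neg (by omega), if_neg (by omega)]
    simp [List.getD, List.getElem?_replicate, Nat.lt_succ_of_le hk]
    omega

lemma markA_cond (n c k : Nat) (hc : 2 ≤ c) (hk : k ≤ n) :
    (∃ i ∈ PySem.List.pyRange 2 (PySem.Int.floordiv ↑n ↑c + 1) 1, (c:Int) * i = (k:Int))
      ↔ (c ∣ k ∧ 2 * c ≤ k) := by
  rw [PySem.Int.floordiv_natCast]
  constructor
  · rintro ⟨i, hi, hik⟩
    rw [PySem.List.mem_pyRange_one] at hi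
    obtain ⟨h2i, hilt⟩ := hi
    lift i to Nat using (by omega) with j
    have hjk : c * j = k := by exact_mod_cast hik
    refine ⟨⟨j, hjk.symm⟩, ?_⟩
    have : 2 ≤ j := by exact_mod_cast h2i
    nlinarith
  · rintro ⟨⟨m, hm⟩, h2c⟩
    refine ⟨(m : Int), ?_, by exact_mod_cast hm.symm⟩
    rw [PySem.List.mem_pyRange_one]
    have hm2 : 2 ≤ m := by nlinarith
    have hcm : c * m ≤ n := hm ▸ hk
    have : m ≤ n / c := Nat.le_div_iff_mul_le (by omega) |>.mpr (by rw [Nat.mul_comm]; exact hcm)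
    constructor
    · exact_mod_cast hm2
    · have : (m : Int) ≤ ((n / c : Nat) : Int) := by exact_mod_cast this
      omega

lemma markB_cond (n c k : Nat) (hc : 2 ≤ c) (hk : k ≤ n) :
    ((k:Int) ∈ PySem.List.pyRange ((c:Int)*(c:Int)) ((n:Int)+1) (c:Int))
      ↔ (c ∣ k ∧ c * c ≤ k) := by
  rw [PySem.List.mem_pyRange_iff_of_pos (by positivity)]
  constructor
  · rintro ⟨h1, h2, m, hm⟩
    have h3 : (c:Int) ∣ ((k:Int) - (c:Int)*(c:Int)) := ⟨m, hm⟩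
    have h4 : (c:Int) ∣ (k:Int) := by
      have h5 : (c:Int) ∣ (c:Int)*(c:Int) := dvd_mul_right _ _
      simpa using dvd_add h3 h5
    exact ⟨Int.natCast_dvd_natCast.mp h4, by exact_mod_cast h1⟩
  · rintro ⟨⟨m, hm⟩, hcc⟩
    refine ⟨by exact_mod_cast hcc, by omega, ⟨(m : Int) - c, ?_⟩⟩
    subst hm
    push_cast
    ring

lemma primeFreeA_succ (c k : Nat) :
    primeFreeA (c+1) k ↔ (primeFreeA c k ∧ (c.Prime → c ∣ k → c = k)) := by
  unfold primeFreeA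
  constructor
  · rintro ⟨h2, h⟩
    exact ⟨⟨h2, fun p hp hlt => h p hp (by omega)⟩, fun hp => h c hp (by omega)⟩
  · rintro ⟨⟨h2, h⟩, hc⟩
    refine ⟨h2, fun p hp hlt hdvd => ?_⟩
    rcases Nat.lt_or_ge p c with h' | h'
    · exact h p hp h' hdvd
    · have : p = c := by omega
      subst this
      exact hc hp hdvd

lemma primeFreeB_succ (c k : Nat) :
    primeFreeB (c+1) k ↔ (primeFreeB c k ∧ (c.Prime → c ∣ k → k < c * c)) := by
  unfold primeFreeB
  constructor
  · rintro ⟨h2, h⟩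
    exact ⟨⟨h2, fun p hp hlt => h p hp (by omega)⟩, fun hp => h c hp (by omega)⟩
  · rintro ⟨⟨h2, h⟩, hc⟩
    refine ⟨h2, fun p hp hlt hdvd => ?_⟩
    rcases Nat.lt_or_ge p c with h' | h'
    · exact h p hp h' hdvd
    · have : p = c := by omega
      subst this
      exact hc hp hdvd

lemma dvd_eq_iff_not_mark (c k : Nat) (hc : 1 ≤ c) (hk : 1 ≤ k) :
    (c ∣ k → c = k) ↔ ¬(c ∣ k ∧ 2 * c ≤ k) := by
  constructor
  · rintro h ⟨hdvd, hle⟩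
    have := h hdvd
    omega
  · intro h hdvd
    rcases hdvd with ⟨m, hm⟩
    rcases Nat.lt_or_ge m 2 with hm2 | hm2
    · interval_cases m <;> omega
    · exact absurd ⟨⟨m, hm⟩, by nlinarith⟩ h

-- the A-sieve invariant

lemma sieveA_inv (n : Nat) (hn : 1 ≤ n) (c : Nat) (hc : 2 ≤ c) (hcs : c ≤ Nat.sqrt n + 1) :
    ((PySem.List.pyRange 2 (c:Int) 1).foldl (eratosStepL ↑n) (sieveInitN n)).length = n + 1 ∧
    ∀ k, k ≤ n →
      (((PySem.List.pyRange 2 (c:Int) 1).foldl (eratosStepL ↑n) (sieveInitN n)).getD k false = true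
        ↔ primeFreeA c k) := by
  induction c, hc using Nat.le_induction with
  | base =>
    rw [PySem.List.pyRange_one_eq_nil (by norm_num)]
    simp only [List.foldl_nil]
    exact ⟨sieveInitN_length n, fun k hk => by rw [sieveInitN_getD n k hn hk, primeFreeA_two]⟩
  | succ c hc ih =>
    obtain ⟨ihlen, ihval⟩ := ih (by omega)
    have hcn : c ≤ n := le_trans (by omega : c ≤ Nat.sqrt n) (Nat.sqrt_le_self n)
    have hsplit : PySem.List.pyRange 2 ((c+1 : Nat):Int) 1
        = PySem.List.pyRange 2 (c:Int) 1 ++ [(c:Int)] := by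
      push_cast
      exact PySem.List.pyRange_one_succ_right (by exact_mod_cast hc)
    rw [hsplit, List.foldl_append, List.foldl_cons, List.foldl_nil]
    set Ec := (PySem.List.pyRange 2 (c:Int) 1).foldl (eratosStepL ↑n) (sieveInitN n) with hEc
    have hguard : PySem.List.pyGetD Ec (c:Int) false = true ↔ c.Prime := by
      rw [PySem.List.pyGetD_natCast, ihval c hcn, primeFreeA_self c hc]
    by_cases hP : c.Prime
    · have hg : PySem.List.pyGetD Ec (c:Int) false = true := hguard.mpr hP
      rw [eratosStepL, if_pos hg]
      have hlen := length_foldl_mark (fun i => (c:Int) * i)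
        (PySem.List.pyRange 2 (PySem.Int.floordiv ↑n ↑c + 1) 1) Ec
      refine ⟨by rw [hlen]; exact ihlen, fun k hk => ?_⟩
      rw [getD_foldl_mark (fun i => (c:Int) * i) _ Ec k (by omega)
        (fun m hm => by
          rw [PySem.List.mem_pyRange_one] at hm
          nlinarith [hm.1])]
      by_cases hmark : ∃ i ∈ PySem.List.pyRange 2 (PySem.Int.floordiv ↑n ↑c + 1) 1, (c:Int) * i = (k:Int)
      · rw [if_pos hmark]
        have hmk := (markA_cond n c k hc hk).mp hmark
        refine iff_of_false (by simp) ?_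
        rw [primeFreeA_succ]
        rintro ⟨⟨h2k, -⟩, hck⟩
        exact absurd ⟨hmk.1, hmk.2⟩ ((dvd_eq_iff_not_mark c k (by omega) (by omega)).mp (hck hP))
      · rw [if_neg hmark, ihval k hk, primeFreeA_succ]
        constructor
        · intro h
          refine ⟨h, fun _ => ?_⟩
          have h2k := h.1
          exact (dvd_eq_iff_not_mark c k (by omega) (by omega)).mpr
            (fun hx => hmark ((markA_cond n c k hc hk).mpr hx))
        · exact fun h => h.1
    · have hg : ¬ (PySem.List.pyGetD Ec (c:Int) false = true) := fun h => hP (hguard.mp h)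
      rw [eratosStepL, if_neg hg]
      refine ⟨ihlen, fun k hk => ?_⟩
      rw [ihval k hk, primeFreeA_succ]
      exact ⟨fun h => ⟨h, fun hp => absurd hp hP⟩, fun h => h.1⟩

-- the B-sieve invariant

lemma sieveBL_inv (n : Nat) (hn : 1 ≤ n) (c : Nat) (hc : 2 ≤ c) (hcs : c ≤ Nat.sqrt n + 1) :
    ((PySem.List.pyRange 2 (c:Int) 1).foldl
        (fun E a => if PySem.List.pyGetD E a false then
            (PySem.List.pyRange (a * a) ((n:Int) + 1) a).foldl
              (fun E m => PySem.List.pySetD E m false) E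
          else E) (sieveInitN n)).length = n + 1 ∧
    ∀ k, k ≤ n →
      (((PySem.List.pyRange 2 (c:Int) 1).foldl
        (fun E a => if PySem.List.pyGetD E a false then
            (PySem.List.pyRange (a * a) ((n:Int) + 1) a).foldl
              (fun E m => PySem.List.pySetD E m false) E
          else E) (sieveInitN n)).getD k false = true
        ↔ primeFreeB c k) := by
  induction c, hc using Nat.le_induction with
  | base =>
    rw [PySem.List.pyRange_one_eq_nil (by norm_num)]
    simp only [List.foldl_nil]
    exact ⟨sieveInitN_length n, fun k hk => by rw [sieveInitN_getD n k hn hk, primeFreeB_two]⟩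
  | succ c hc ih =>
    obtain ⟨ihlen, ihval⟩ := ih (by omega)
    have hcn : c ≤ n := le_trans (by omega : c ≤ Nat.sqrt n) (Nat.sqrt_le_self n)
    have hsplit : PySem.List.pyRange 2 ((c+1 : Nat):Int) 1
        = PySem.List.pyRange 2 (c:Int) 1 ++ [(c:Int)] := by
      push_cast
      exact PySem.List.pyRange_one_succ_right (by exact_mod_cast hc)
    rw [hsplit, List.foldl_append, List.foldl_cons, List.foldl_nil]
    set Ec := (PySem.List.pyRange 2 (c:Int) 1).foldl
        (fun E a => if PySem.List.pyGetD E a false then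
            (PySem.List.pyRange (a * a) ((n:Int) + 1) a).foldl
              (fun E m => PySem.List.pySetD E m false) E
          else E) (sieveInitN n) with hEc
    have hguard : PySem.List.pyGetD Ec (c:Int) false = true ↔ c.Prime := by
      rw [PySem.List.pyGetD_natCast, ihval c hcn, primeFreeB_self c hc]
    by_cases hP : c.Prime
    · have hg : PySem.List.pyGetD Ec (c:Int) false = true := hguard.mpr hP
      rw [if_pos hg]
      have hlen := length_foldl_mark (fun m => m)
        (PySem.List.pyRange ((c:Int) * (c:Int)) ((n:Int) + 1) (c:Int)) Ec
      refine ⟨by rw [hlen]; exact ihlen, fun k hk => ?_⟩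
      rw [getD_foldl_mark (fun m => m) _ Ec k (by omega)
        (fun m hm => by
          rw [PySem.List.mem_pyRange_iff_of_pos (by positivity)] at hm
          nlinarith [hm.1])]
      by_cases hmark : ∃ m ∈ PySem.List.pyRange ((c:Int) * (c:Int)) ((n:Int) + 1) (c:Int), m = (k:Int)
      · rw [if_pos hmark]
        have hmem : (k:Int) ∈ PySem.List.pyRange ((c:Int) * (c:Int)) ((n:Int) + 1) (c:Int) := by
          obtain ⟨m, hm, rfl⟩ := hmark
          exact hm
        have hmk := (markB_cond n c k hc hk).mp hmem
        refine iff_of_false (by simp) ?_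
        rw [primeFreeB_succ]
        rintro ⟨-, hck⟩
        exact absurd (hck hP hmk.1) (by omega)
      · rw [if_neg hmark, ihval k hk, primeFreeB_succ]
        constructor
        · intro h
          refine ⟨h, fun _ hdvd => ?_⟩
          by_contra hge
          exact hmark ⟨(k:Int), (markB_cond n c k hc hk).mpr ⟨hdvd, by omega⟩, rfl⟩
        · exact fun h => h.1
    · have hg : ¬ (PySem.List.pyGetD Ec (c:Int) false = true) := fun h => hP (hguard.mp h)
      rw [if_neg hg]
      refine ⟨ihlen, fun k hk => ?_⟩
      rw [ihval k hk, primeFreeB_succ]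
      exact ⟨fun h => ⟨h, fun hp => absurd hp hP⟩, fun h => h.1⟩

lemma EinitA_eq (n : Nat) :
    PySem.List.pySetD (PySem.List.pySetD
      ((PySem.List.pyRange 0 ((n:Int) + 1) 1).map (fun _ => true)) 0 false) 1 false
    = sieveInitN n := by
  rw [PySem.List.pySetD_of_nonneg _ _ (by norm_num), PySem.List.pySetD_of_nonneg _ _ (by norm_num)]
  unfold sieveInitN
  congr 1
  congr 1
  rw [List.map_const', PySem.List.length_pyRange_one]
  congr 1

lemma EinitB_eq (n : Nat) :
    PySem.List.pySetD (PySem.List.pySetD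
      (PySem.List.pyRepeat [true] ((n:Int) + 1)) 0 false) 1 false
    = sieveInitN n := by
  rw [PySem.List.pySetD_of_nonneg _ _ (by norm_num), PySem.List.pySetD_of_nonneg _ _ (by norm_num)]
  unfold sieveInitN
  rw [PySem.List.pyRepeat_singleton]
  congr 2

lemma eratosEL_getD (n : Nat) (hn : 1 ≤ n) (k : Nat) (hk : k ≤ n) :
    (PySem.List.pyGetD (eratosEL (n:Int)) (k:Int) false = true) ↔ k.Prime := by
  have hcast : ((n:Int).toNat) = n := Int.toNat_natCast n
  rw [PySem.List.pyGetD_natCast]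
  unfold eratosEL
  simp only [hcast]
  rw [EinitA_eq]
  have hc : ((Nat.sqrt n + 1 : Nat) : Int) = ((Nat.sqrt n : Nat) : Int) + 1 := by push_cast; ring
  rw [← hc]
  rw [(sieveA_inv n hn (Nat.sqrt n + 1) (by have := Nat.sqrt_pos.mpr (by omega : 0 < n); omega)
    (le_refl _)).2 k hk]
  exact primeFreeA_sqrt n k hk

lemma sieveBL_getD (n : Nat) (hn : 1 ≤ n) (k : Nat) (hk : k ≤ n) :
    (PySem.List.pyGetD (sieveBL (n:Int)) (k:Int) false = true) ↔ k.Prime := by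
  have hcast : ((n:Int).toNat) = n := Int.toNat_natCast n
  rw [PySem.List.pyGetD_natCast]
  unfold sieveBL
  simp only [hcast]
  rw [EinitB_eq]
  have hc : ((Nat.sqrt n + 1 : Nat) : Int) = ((Nat.sqrt n : Nat) : Int) + 1 := by push_cast; ring
  rw [← hc]
  rw [(sieveBL_inv n hn (Nat.sqrt n + 1) (by have := Nat.sqrt_pos.mpr (by omega : 0 < n); omega)
    (le_refl _)).2 k hk]
  exact primeFreeB_sqrt n k hk

lemma mem_foldl_add_if (l : List Int) (q : Int → Bool) (s : PySem.Set Int) (x : Int) :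
    (x ∈ l.foldl (fun P a => if q a then PySem.Set.add P a else P) s)
      ↔ x ∈ s ∨ (x ∈ l ∧ q x = true) := by
  induction l generalizing s with
  | nil => simp
  | cons a t ih =>
    rw [List.foldl_cons]
    by_cases hq : q a = true
    · rw [if_pos hq, ih, PySem.Set.mem_add]
      constructor
      · rintro ((h | rfl) | h)
        · exact Or.inl h
        · exact Or.inr ⟨by simp, hq⟩
        · exact Or.inr ⟨by simp [h.1], h.2⟩
      · rintro (h | ⟨hmem, hqx⟩)
        · exact Or.inl (Or.inl h)
        · rcases List.mem_cons.mp hmem with rfl | hmem'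
          · exact Or.inl (Or.inr rfl)
          · exact Or.inr ⟨hmem', hqx⟩
    · rw [if_neg hq, ih]
      constructor
      · rintro (h | h)
        · exact Or.inl h
        · exact Or.inr ⟨by simp [h.1], h.2⟩
      · rintro (h | ⟨hmem, hqx⟩)
        · exact Or.inl h
        · rcases List.mem_cons.mp hmem with rfl | hmem'
          · exact absurd hqx hq
          · exact Or.inr ⟨hmem', hqx⟩

def Wgame (i : Nat) : Bool :=
  decide (i ≤ 1) ||
    ((List.range i).attach.any (fun j => decide (Nat.Prime (i - j.1)) && !Wgame j.1))
termination_by i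
decreasing_by exact List.mem_range.mp j.2

lemma Wgame_true_iff (i : Nat) :
    Wgame i = true ↔ (i ≤ 1 ∨ ∃ j < i, Nat.Prime (i - j) ∧ Wgame j = false) := by
  rw [Wgame]
  simp only [Bool.or_eq_true, List.any_eq_true, List.mem_attach, true_and, Bool.and_eq_true,
    decide_eq_true_eq, Bool.not_eq_true', Subtype.exists, List.mem_range]
  constructor
  · rintro (h | ⟨j, hj, hp, hw⟩)
    · exact Or.inl h
    · exact Or.inr ⟨j, hj, hp, hw⟩
  · rintro (h | ⟨j, hj, hp, hw⟩)
    · exact Or.inl h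
    · exact Or.inr ⟨j, hj, hp, hw⟩

-- collapsing A's inner loop over the prime set (writes only index i, reads strictly below i)

lemma dpInner (i : Nat) (P : List Int) (hP : ∀ p ∈ P, 1 ≤ p) (dp : List Bool)
    (hi : i < dp.length) :
    P.foldl (fun dp p =>
        if 0 ≤ (i:Int) - p then
          if !(PySem.List.pyGetD dp ((i:Int) - p) false) then PySem.List.pySetD dp (i:Int) true
          else dp
        else dp) dp
    = if ∃ p ∈ P, 0 ≤ (i:Int) - p ∧ PySem.List.pyGetD dp ((i:Int) - p) false = false
      then dp.set i true else dp := by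
  induction P generalizing dp with
  | nil => simp
  | cons a t ih =>
    have ha : 1 ≤ a := hP a (by simp)
    rw [List.foldl_cons]
    have hread : ∀ p : Int, 1 ≤ p → 0 ≤ (i:Int) - p →
        PySem.List.pyGetD (dp.set i true) ((i:Int) - p) false
          = PySem.List.pyGetD dp ((i:Int) - p) false := by
      intro p hp1 hp0
      rw [PySem.List.pyGetD_of_nonneg _ _ hp0, PySem.List.pyGetD_of_nonneg _ _ hp0,
        getD_set_ite]
      rw [if_neg]
      rintro ⟨h1, -⟩
      omega
    by_cases hcond : 0 ≤ (i:Int) - a ∧ PySem.List.pyGetD dp ((i:Int) - a) false = false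
    · rw [if_pos hcond.1, if_pos (by simp [hcond.2]), PySem.List.pySetD_natCast]
      rw [ih (fun p hp => hP p (by simp [hp])) _ (by simp [hi])]
      have hiff : (∃ p ∈ t, 0 ≤ (i:Int) - p ∧
            PySem.List.pyGetD (dp.set i true) ((i:Int) - p) false = false)
          ↔ (∃ p ∈ t, 0 ≤ (i:Int) - p ∧ PySem.List.pyGetD dp ((i:Int) - p) false = false) := by
        constructor
        · rintro ⟨p, hpt, hp0, hpv⟩
          exact ⟨p, hpt, hp0, by rw [← hread p (hP p (by simp [hpt])) hp0]; exact hpv⟩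
        · rintro ⟨p, hpt, hp0, hpv⟩
          exact ⟨p, hpt, hp0, by rw [hread p (hP p (by simp [hpt])) hp0]; exact hpv⟩
      have hRHS : (∃ p ∈ a :: t, 0 ≤ (i:Int) - p ∧
          PySem.List.pyGetD dp ((i:Int) - p) false = false) := ⟨a, by simp, hcond⟩
      rw [if_pos hRHS]
      by_cases ht : ∃ p ∈ t, 0 ≤ (i:Int) - p ∧ PySem.List.pyGetD dp ((i:Int) - p) false = false
      · rw [if_pos (hiff.mpr ht), List.set_set]
      · rw [if_neg (fun hx => ht (hiff.mp hx))]
    · have hstep : (if 0 ≤ (i:Int) - a then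
          if !(PySem.List.pyGetD dp ((i:Int) - a) false) then PySem.List.pySetD dp (i:Int) true
          else dp
        else dp) = dp := by
        by_cases h0 : 0 ≤ (i:Int) - a
        · rw [if_pos h0, if_neg]
          simp only [Bool.not_eq_eq_eq_not, Bool.not_true] at *
          intro hx
          exact hcond ⟨h0, by simpa using hx⟩
        · rw [if_neg h0]
      rw [hstep, ih (fun p hp => hP p (by simp [hp])) _ hi]
      have : (∃ p ∈ a :: t, 0 ≤ (i:Int) - p ∧ PySem.List.pyGetD dp ((i:Int) - p) false = false)
          ↔ (∃ p ∈ t, 0 ≤ (i:Int) - p ∧ PySem.List.pyGetD dp ((i:Int) - p) false = false) := by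
        constructor
        · rintro ⟨p, hpt, hp⟩
          rcases List.mem_cons.mp hpt with rfl | hpt'
          · exact absurd hp hcond
          · exact ⟨p, hpt', hp⟩
        · rintro ⟨p, hpt, hp⟩
          exact ⟨p, by simp [hpt], hp⟩
      simp only [this]

def dpInitN (n : Nat) : List Bool := ((List.replicate (n+1) false).set 0 true).set 1 true

lemma dpInitN_eq (n : Nat) :
    PySem.List.pySetD (PySem.List.pySetD
      ((PySem.List.pyRange 0 ((n:Int) + 1) 1).map (fun _ => false)) 0 true) 1 true
    = dpInitN n := by
  rw [PySem.List.pySetD_of_nonneg _ _ (by norm_num), PySem.List.pySetD_of_nonneg _ _ (by norm_num)]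
  unfold dpInitN
  congr 1
  congr 1
  rw [List.map_const', PySem.List.length_pyRange_one]
  congr 1

lemma dpInitN_length (n : Nat) : (dpInitN n).length = n + 1 := by simp [dpInitN]

lemma dpInitN_getD (n k : Nat) (hn : 1 ≤ n) (hk : k ≤ n) :
    (dpInitN n).getD k false = decide (k ≤ 1) := by
  unfold dpInitN
  rw [getD_set_ite, getD_set_ite]
  simp only [List.length_set, List.length_replicate]
  rcases Nat.lt_or_ge k 2 with h | h
  · interval_cases k
    · rw [if_neg (by omega), if_pos ⟨rfl, by omega⟩]; simp
    · rw [if_pos ⟨rfl, by omega⟩]; simp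
  · rw [if_neg (by omega), if_neg (by omega)]
    simp [List.getD, List.getElem?_replicate, Nat.lt_succ_of_le hk]
    omega

lemma dpOuter (n : Nat) (hn : 1 ≤ n) (P : List Int)
    (hPmem : ∀ x, x ∈ P ↔ ∃ p : Nat, x = (p:Int) ∧ p ≤ n ∧ p.Prime)
    (m : Nat) (hm : m ≤ n + 1) :
    ((PySem.List.pyRange 0 (m:Int) 1).foldl
        (fun dp i => P.foldl (fun dp p =>
            if 0 ≤ i - p then
              if !(PySem.List.pyGetD dp (i - p) false) then PySem.List.pySetD dp i true else dp
            else dp) dp)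
        (dpInitN n)).length = n + 1 ∧
    ∀ k, k ≤ n →
      ((PySem.List.pyRange 0 (m:Int) 1).foldl
        (fun dp i => P.foldl (fun dp p =>
            if 0 ≤ i - p then
              if !(PySem.List.pyGetD dp (i - p) false) then PySem.List.pySetD dp i true else dp
            else dp) dp)
        (dpInitN n)).getD k false
        = if k < m then Wgame k else decide (k ≤ 1) := by
  have hP1 : ∀ p ∈ P, 1 ≤ p := by
    intro p hp
    obtain ⟨q, rfl, -, hq⟩ := (hPmem p).mp hp
    have := hq.two_le
    omega
  induction m with
  | zero =>
    rw [PySem.List.pyRange_one_eq_nil (by norm_num)]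
    simp only [List.foldl_nil]
    exact ⟨dpInitN_length n, fun k hk => by
      rw [dpInitN_getD n k hn hk, if_neg (by omega)]⟩
  | succ m ih =>
    obtain ⟨ihlen, ihval⟩ := ih (by omega)
    have hmn : m ≤ n := by omega
    have hsplit : PySem.List.pyRange 0 ((m+1 : Nat):Int) 1
        = PySem.List.pyRange 0 (m:Int) 1 ++ [(m:Int)] := by
      push_cast
      exact PySem.List.pyRange_one_succ_right (by positivity)
    rw [hsplit, List.foldl_append, List.foldl_cons, List.foldl_nil]
    set dpm := (PySem.List.pyRange 0 (m:Int) 1).foldl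
        (fun dp i => P.foldl (fun dp p =>
            if 0 ≤ i - p then
              if !(PySem.List.pyGetD dp (i - p) false) then PySem.List.pySetD dp i true else dp
            else dp) dp)
        (dpInitN n) with hdpm
    rw [dpInner m P hP1 dpm (by omega)]
    have hcond_iff : (∃ p ∈ P, 0 ≤ (m:Int) - p ∧ PySem.List.pyGetD dpm ((m:Int) - p) false = false)
        ↔ (∃ j < m, Nat.Prime (m - j) ∧ Wgame j = false) := by
      constructor
      · rintro ⟨p, hpP, hp0, hpv⟩
        obtain ⟨q, rfl, hqn, hqp⟩ := (hPmem p).mp hpP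
        have hq2 := hqp.two_le
        have hqm : q ≤ m := by omega
        have hcast : ((m:Int) - (q:Int)) = (((m - q : Nat)) : Int) := by omega
        rw [hcast, PySem.List.pyGetD_natCast] at hpv
        rw [ihval (m - q) (by omega)] at hpv
        rw [if_pos (by omega)] at hpv
        refine ⟨m - q, by omega, by rw [show m - (m - q) = q by omega]; exact hqp, hpv⟩
      · rintro ⟨j, hj, hjp, hjw⟩
        have hq2 := hjp.two_le
        refine ⟨((m - j : Nat) : Int), (hPmem _).mpr ⟨m - j, rfl, by omega, hjp⟩, by omega, ?_⟩
        have hcast : ((m:Int) - ((m - j : Nat) : Int)) = ((j : Nat) : Int) := by omega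
        rw [hcast, PySem.List.pyGetD_natCast, ihval j (by omega), if_pos hj]
        exact hjw
    by_cases hc : ∃ p ∈ P, 0 ≤ (m:Int) - p ∧ PySem.List.pyGetD dpm ((m:Int) - p) false = false
    · rw [if_pos hc]
      refine ⟨by simp [ihlen], fun k hk => ?_⟩
      rw [getD_set_ite]
      by_cases hkm : k = m
      · subst hkm
        rw [if_pos ⟨rfl, by omega⟩, if_pos (by omega)]
        exact ((Wgame_true_iff k).mpr (Or.inr (hcond_iff.mp hc))).symm
      · rw [if_neg (by omega), ihval k hk]
        by_cases hklt : k < m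
        · rw [if_pos hklt, if_pos (by omega)]
        · rw [if_neg hklt, if_neg (by omega)]
    · rw [if_neg hc]
      refine ⟨ihlen, fun k hk => ?_⟩
      rw [ihval k hk]
      by_cases hkm : k = m
      · subst hkm
        rw [if_neg (by omega), if_pos (by omega)]
        have hno : ¬ ∃ j < k, Nat.Prime (k - j) ∧ Wgame j = false :=
          fun h => hc (hcond_iff.mpr h)
        rw [Bool.eq_iff_iff, decide_eq_true_iff, Wgame_true_iff]
        constructor
        · exact fun h => Or.inl h
        · rintro (h | h)
          · exact h
          · exact absurd h hno
      · by_cases hklt : k < m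
        · rw [if_pos hklt, if_pos (by omega)]
        · rw [if_neg hklt, if_neg (by omega)]

lemma pyArrGet_eq_pyGetD (xs : Array Bool) (i : Int) (d : Bool) (h : 0 ≤ i) :
    pyArrGet xs i d = PySem.List.pyGetD xs.toList i d := by
  rw [PySem.List.pyGetD_of_nonneg _ _ h]
  unfold pyArrGet
  simp [Array.getD, List.getD]
  split_ifs with h'
  · rw [Array.getElem?_eq_getElem h']; rfl
  · rw [Array.getElem?_eq_none (by omega)]; rfl

lemma pyArrSet_toList (xs : Array Bool) (i : Int) (v : Bool) (h : 0 ≤ i) :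
    (pyArrSet xs i v).toList = PySem.List.pySetD xs.toList i v := by
  rw [PySem.List.pySetD_of_nonneg _ _ h]
  unfold pyArrSet
  exact Array.toList_setIfInBounds

lemma foldl_toList_hom {σ : Type} (l : List σ) (f : Array Bool → σ → Array Bool)
    (g : List Bool → σ → List Bool) (a0 : Array Bool)
    (h : ∀ a x, x ∈ l → (f a x).toList = g a.toList x) :
    (l.foldl f a0).toList = l.foldl g a0.toList := by
  induction l generalizing a0 with
  | nil => rfl
  | cons x t ih =>
    rw [List.foldl_cons, List.foldl_cons, ih _ (fun a y hy => h a y (by simp [hy])),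
      h a0 x (by simp)]

lemma eratosStep_toList (n : Int) (E : Array Bool) (a : Int) (ha : 0 ≤ a) :
    (eratosStep n E a).toList = eratosStepL n E.toList a := by
  unfold eratosStep eratosStepL
  rw [pyArrGet_eq_pyGetD _ _ _ ha]
  by_cases hg : PySem.List.pyGetD E.toList a false = true
  · rw [if_pos hg, if_pos hg]
    refine foldl_toList_hom _ _ _ _ (fun A i hi => ?_)
    rw [PySem.List.mem_pyRange_one] at hi
    exact pyArrSet_toList _ _ _ (by nlinarith [hi.1])
  · rw [if_neg hg, if_neg hg]

lemma eratosE_toList (n : Int) : (eratosE n).toList = eratosEL n := by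
  simp only [eratosE, eratosEL]
  rw [foldl_toList_hom _ _ (eratosStepL n) _
    (fun A a hmem => eratosStep_toList n A a
      (by rw [PySem.List.mem_pyRange_one] at hmem; omega))]
  rw [pyArrSet_toList _ _ _ (by norm_num), pyArrSet_toList _ _ _ (by norm_num),
    List.toList_toArray]

lemma sieveB_toList (n : Int) : (sieveB n).toList = sieveBL n := by
  simp only [sieveB, sieveBL]
  rw [foldl_toList_hom _ _
    (fun E a => if PySem.List.pyGetD E a false then
        (PySem.List.pyRange (a * a) (n + 1) a).foldl
          (fun E m => PySem.List.pySetD E m false) E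
      else E) _
    (fun A a hmem => ?_)]
  · rw [pyArrSet_toList _ _ _ (by norm_num), pyArrSet_toList _ _ _ (by norm_num),
      List.toList_toArray]
  · beta_reduce
    rw [PySem.List.mem_pyRange_one] at hmem
    have ha : (0:Int) ≤ a := by omega
    rw [pyArrGet_eq_pyGetD _ _ _ ha]
    by_cases hg : PySem.List.pyGetD A.toList a false = true
    · rw [if_pos hg, if_pos hg]
      refine foldl_toList_hom _ _ _ _ (fun B m hm => ?_)
      rw [PySem.List.mem_pyRange_iff_of_pos (by omega)] at hm
      exact pyArrSet_toList _ _ _ (by nlinarith [hm.1])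
    · rw [if_neg hg, if_neg hg]

lemma eratosArr_get (n : Nat) (hn : 1 ≤ n) (k : Nat) (hk : k ≤ n) :
    (pyArrGet (eratosE (n:Int)) (k:Int) false = true) ↔ k.Prime := by
  rw [pyArrGet_eq_pyGetD _ _ _ (by positivity), eratosE_toList]
  exact eratosEL_getD n hn k hk

lemma sieveBArr_get (n : Nat) (hn : 1 ≤ n) (k : Nat) (hk : k ≤ n) :
    (pyArrGet (sieveB (n:Int)) (k:Int) false = true) ↔ k.Prime := by
  rw [pyArrGet_eq_pyGetD _ _ _ (by positivity), sieveB_toList]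
  exact sieveBL_getD n hn k hk

lemma mem_eratos (n : Nat) (hn : 1 ≤ n) (x : Int) :
    x ∈ eratos (n:Int) ↔ ∃ p : Nat, x = (p:Int) ∧ p ≤ n ∧ p.Prime := by
  simp only [eratos]
  rw [mem_foldl_add_if]
  constructor
  · rintro (h | ⟨hmem, hq⟩)
    · simp [PySem.Set.empty] at h
    · rw [PySem.List.mem_pyRange_one] at hmem
      obtain ⟨h0, h1⟩ := hmem
      lift x to Nat using h0 with p
      refine ⟨p, rfl, by omega, ?_⟩
      exact (eratosArr_get n hn p (by omega)).mp hq
  · rintro ⟨p, rfl, hpn, hp⟩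
    refine Or.inr ⟨?_, (eratosArr_get n hn p hpn).mpr hp⟩
    rw [PySem.List.mem_pyRange_one]
    omega

lemma bLoop (n : Nat) (hn : 1 ≤ n) (isp : Array Bool)
    (hisp : ∀ k : Nat, k ≤ n → ((pyArrGet isp (k:Int) false = true) ↔ k.Prime))
    (m : Nat) (hm : m ≤ n + 1) :
    (∀ x, (x ∈ ((PySem.List.pyRange 0 (m:Int) 1).foldl
        (fun st i =>
          let win := decide (i ≤ 1) || st.1.any (fun j => pyArrGet isp (i - j) false)
          (if win then st.1 else st.1 ++ [i], win)) (([] : List Int), false)).1)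
      ↔ ∃ j : Nat, x = (j:Int) ∧ j < m ∧ Wgame j = false) ∧
    ((PySem.List.pyRange 0 (m:Int) 1).foldl
        (fun st i =>
          let win := decide (i ≤ 1) || st.1.any (fun j => pyArrGet isp (i - j) false)
          (if win then st.1 else st.1 ++ [i], win)) (([] : List Int), false)).2
      = (if m = 0 then false else Wgame (m - 1)) := by
  induction m with
  | zero =>
    rw [PySem.List.pyRange_one_eq_nil (by norm_num)]
    simp only [List.foldl_nil]
    exact ⟨fun x => by simp, by simp⟩
  | succ m ih =>
    obtain ⟨ihmem, ihwin⟩ := ih (by omega)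
    have hmn : m ≤ n := by omega
    have hsplit : PySem.List.pyRange 0 ((m+1 : Nat):Int) 1
        = PySem.List.pyRange 0 (m:Int) 1 ++ [(m:Int)] := by
      push_cast
      exact PySem.List.pyRange_one_succ_right (by positivity)
    rw [hsplit, List.foldl_append, List.foldl_cons, List.foldl_nil]
    set st := (PySem.List.pyRange 0 (m:Int) 1).foldl
        (fun st i =>
          let win := decide (i ≤ 1) || st.1.any (fun j => pyArrGet isp (i - j) false)
          (if win then st.1 else st.1 ++ [i], win)) (([] : List Int), false) with hst
    have hwin : (decide ((m:Int) ≤ 1) || st.1.any (fun j => pyArrGet isp ((m:Int) - j) false))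
        = Wgame m := by
      rw [Bool.eq_iff_iff, Bool.or_eq_true, List.any_eq_true, Wgame_true_iff,
        decide_eq_true_eq]
      constructor
      · rintro (h | ⟨x, hxL, hxv⟩)
        · exact Or.inl (by exact_mod_cast h)
        · obtain ⟨j, rfl, hj, hjw⟩ := (ihmem x).mp hxL
          have hcast : ((m:Int) - (j:Int)) = (((m - j : Nat)) : Int) := by omega
          rw [hcast] at hxv
          exact Or.inr ⟨j, hj, (hisp (m - j) (by omega)).mp hxv, hjw⟩
      · rintro (h | ⟨j, hj, hjp, hjw⟩)
        · exact Or.inl (by exact_mod_cast h)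
        · refine Or.inr ⟨(j:Int), (ihmem _).mpr ⟨j, rfl, hj, hjw⟩, ?_⟩
          have hcast : ((m:Int) - (j:Int)) = (((m - j : Nat)) : Int) := by omega
          rw [hcast]
          exact (hisp (m - j) (by omega)).mpr hjp
    simp only []
    rw [hwin]
    constructor
    · intro x
      by_cases hw : Wgame m = true
      · rw [if_pos hw, ihmem x]
        constructor
        · rintro ⟨j, rfl, hj, hjw⟩
          exact ⟨j, rfl, by omega, hjw⟩
        · rintro ⟨j, rfl, hj, hjw⟩
          refine ⟨j, rfl, ?_, hjw⟩
          rcases Nat.lt_or_ge j m with h' | h'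
          · exact h'
          · have : j = m := by omega
            subst this
            rw [hw] at hjw
            exact absurd hjw (by simp)
      · rw [if_neg hw, List.mem_append]
        rw [ihmem x]
        constructor
        · rintro (⟨j, rfl, hj, hjw⟩ | hx)
          · exact ⟨j, rfl, by omega, hjw⟩
          · have hx' : x = (m:Int) := by simpa using hx
            exact ⟨m, hx', by omega, by simpa using hw⟩
        · rintro ⟨j, rfl, hj, hjw⟩
          rcases Nat.lt_or_ge j m with h' | h'
          · exact Or.inl ⟨j, rfl, h', hjw⟩
          · have : j = m := by omega
            subst this
            exact Or.inr (by simp)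
    · simp

lemma solveA_eq (n : Nat) (hn : 1 ≤ n) : solve (n:Int) = Wgame n := by
  simp only [solve]
  have hfold : ((PySem.List.pyRange 0 ((n:Int) + 1) 1).foldl
      (fun dp i =>
        (eratos (n:Int)).foldl (fun dp p =>
          if 0 ≤ i - p then
            if !(pyArrGet dp (i - p) false) then pyArrSet dp i true else dp
          else dp) dp)
      (pyArrSet (pyArrSet
        (((PySem.List.pyRange 0 ((n:Int) + 1) 1).map (fun _ => false)).toArray) 0 true) 1 true)).toList
      = (PySem.List.pyRange 0 ((n:Int) + 1) 1).foldl
      (fun dp i =>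
        (eratos (n:Int)).foldl (fun dp p =>
          if 0 ≤ i - p then
            if !(PySem.List.pyGetD dp (i - p) false) then PySem.List.pySetD dp i true else dp
          else dp) dp)
      (dpInitN n) := by
    rw [foldl_toList_hom _ _
      (fun dp i =>
        (eratos (n:Int)).foldl (fun dp p =>
          if 0 ≤ i - p then
            if !(PySem.List.pyGetD dp (i - p) false) then PySem.List.pySetD dp i true else dp
          else dp) dp) _
      (fun A i hi => ?_)]
    · rw [pyArrSet_toList _ _ _ (by norm_num), pyArrSet_toList _ _ _ (by norm_num),
        List.toList_toArray, dpInitN_eq]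
    · beta_reduce
      rw [PySem.List.mem_pyRange_one] at hi
      refine foldl_toList_hom _ _ _ _ (fun B p _ => ?_)
      beta_reduce
      by_cases h0 : (0:Int) ≤ i - p
      · rw [if_pos h0, if_pos h0, pyArrGet_eq_pyGetD _ _ _ h0]
        by_cases hr : PySem.List.pyGetD B.toList (i - p) false = true
        · simp [hr]
        · have hr' : PySem.List.pyGetD B.toList (i - p) false = false := by
            simpa using hr
          simp only [hr', Bool.not_false, if_pos rfl]
          exact pyArrSet_toList _ _ _ (by omega)
      · rw [if_neg h0, if_neg h0]
  rw [pyArrGet_eq_pyGetD _ _ _ (by positivity), hfold]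
  have hc : ((n:Int) + 1) = (((n + 1 : Nat)) : Int) := by push_cast; ring
  rw [hc, PySem.List.pyGetD_natCast]
  rw [(dpOuter n hn (eratos ↑n) (mem_eratos n hn) (n+1) le_rfl).2 n (le_refl n)]
  rw [if_pos (by omega)]

lemma solveB_eq (n : Nat) (hn : 1 ≤ n) : solve_alt (n:Int) = Wgame n := by
  simp only [solve_alt]
  have hc : ((n:Int) + 1) = (((n + 1 : Nat)) : Int) := by push_cast; ring
  rw [hc]
  rw [(bLoop n hn (sieveB ↑n) (fun k hk => sieveBArr_get n hn k hk) (n+1) le_rfl).2]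
  simp

lemma solveAB_eq (n : Int) (hpre : 1 ≤ n) : solve n = solve_alt n := by
  lift n to Nat using (by omega : (0:Int) ≤ n) with N
  have hN : 1 ≤ N := by exact_mod_cast hpre
  rw [solveA_eq N hN, solveB_eq N hN]

-- ===== VERDICT (by name: the statement is the Claim_ definition above) =====
theorem solve_spec : Claim_equal_solve := by
  intro n _ hpre
  exact solveAB_eq n hpre
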